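-- pv_equiv track=rewrite | github.com/andreaslordos/olympia-rpi | fsociety/code/main.py | brackets_remove
-- ===== SOURCE A (Python) =====
-- def brackets_remove(string):
--     returnString=""
--     foundBracket=False
--     for x in range(len(string)):
--         if string[x]!="(" and string[x]!=")" and foundBracket==False:
--             returnString+=string[x]
--         elif string[x]=="(":
--             foundBracket=True
--             returnString=returnString[0:-1]
--         elif string[x]==")":
--             foundBracket=False
--     return returnString
-- ===== SOURCE B (Python) =====
-- def brackets_remove(string):
--     # pass 1: drop bracketed spans, keeping each '(' as a backspace marker
--     tokens = []
--     inside = False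
--     for ch in string:
--         if ch == "(":
--             tokens.append(ch)
--             inside = True
--         elif ch == ")":
--             inside = False
--         elif not inside:
--             tokens.append(ch)
--     # pass 2: resolve the backspaces scanning right-to-left with a counter
--     out = []
--     pending = 0
--     for ch in reversed(tokens):
--         if ch == "(":
--             pending += 1
--         elif pending:
--             pending -= 1
--         else:
--             out.append(ch)
--     out.reverse()
--     return "".join(out)
-- ===== Notes on version B (the rewrite author's own statement) =====
-- stated objective: alternative
-- what changed: Replaces A's single-pass state machine that edits its result string in place (append, and a full-string slice returnString[0:-1] whenever an opening bracket is hit) by a two-stage algorithm: one pass strips bracketed spans keeping each opening bracket as a backspace marker, then a reverse scan with a pending-backspace counter resolves the deletions, so the buffer is never truncated; intended as faster (avoids A's worst-case quadratic slicing) but measured only ~1.3x on generated inputs.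
import Mathlib
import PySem

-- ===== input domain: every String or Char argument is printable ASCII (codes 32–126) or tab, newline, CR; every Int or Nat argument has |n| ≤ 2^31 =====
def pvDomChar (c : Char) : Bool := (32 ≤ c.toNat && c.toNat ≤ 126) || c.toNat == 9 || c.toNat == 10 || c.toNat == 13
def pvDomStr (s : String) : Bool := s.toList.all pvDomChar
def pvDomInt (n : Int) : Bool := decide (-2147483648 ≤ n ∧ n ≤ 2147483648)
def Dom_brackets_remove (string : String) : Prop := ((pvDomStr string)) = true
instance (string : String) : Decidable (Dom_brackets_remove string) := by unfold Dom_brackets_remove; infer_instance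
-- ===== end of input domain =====

-- B replaces A's in-place edited result string by two staged passes: strip bracketed spans
-- keeping each opening bracket as a backspace marker, then resolve the backspaces by a
-- reverse scan with a pending counter (alternative decomposition; no buffer truncation).
-- ===== PORT A =====
-- state = (returnString, foundBracket); string[x] via pyGetD on the char list (x always in range),
-- returnString[0:-1] via PySem.List.slice.
def brackets_remove (string : String) : String :=
  String.ofList
    ((PySem.List.pyRange 0 (string.toList.length : Int) 1).foldl
      (fun (st : List Char × Bool) x =>
        if PySem.List.pyGetD string.toList x ' ' ≠ '(' ∧ PySem.List.pyGetD string.toList x ' ' ≠ ')' ∧ st.2 = false then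
          (st.1 ++ [PySem.List.pyGetD string.toList x ' '], st.2)
        else if PySem.List.pyGetD string.toList x ' ' = '(' then (PySem.List.slice st.1 (some 0) (some (-1)), true)
        else if PySem.List.pyGetD string.toList x ' ' = ')' then (st.1, false)
        else st)
      (([] : List Char), false)).1

-- ===== PORT B =====
-- pass 1: state = (tokens, inside); pass 2: state = (out, pending) over reversed tokens,
-- 'elif pending' is pending ≠ 0; out.reverse() at the end.
def brackets_remove_alt (string : String) : String :=
  String.ofList
    (((string.toList.foldl
        (fun (st : List Char × Bool) ch =>
          if ch = '(' then (st.1 ++ [ch], true)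
          else if ch = ')' then (st.1, false)
          else if st.2 = false then (st.1 ++ [ch], st.2)
          else st)
        (([] : List Char), false)).1.reverse.foldl
      (fun (st : List Char × Int) ch =>
        if ch = '(' then (st.1, st.2 + 1)
        else if st.2 ≠ 0 then (st.1, st.2 - 1)
        else (st.1 ++ [ch], st.2))
      (([] : List Char), 0)).1.reverse)

-- ===== PRECONDITION & SPEC =====
def Spec_brackets_remove (string : String) (out : String) : Prop := out = brackets_remove_alt string
instance (string : String) (out : String) : Decidable (Spec_brackets_remove string out) := by unfold Spec_brackets_remove; infer_instance

-- ===== CLAIM =====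
def Claim_equal_brackets_remove : Prop := ∀ (string : String), Dom_brackets_remove string → Spec_brackets_remove string (brackets_remove string)

-- ===== LEMMAS AND PROOFS =====

-- token stream of pass 1, as a structural recursion on the characters (b is the inside flag)
def pvT (b : Bool) : List Char → List Char
  | [] => []
  | c :: cs =>
    if c = '(' then '(' :: pvT true cs
    else if c = ')' then pvT false cs
    else if b then pvT b cs
    else c :: pvT b cs

-- the buffer-editing interpretation of a token stream (A's mechanism)
def pvPop (acc : List Char) (c : Char) : List Char :=
  if c = '(' then acc.dropLast else acc ++ [c]

-- n-fold dropLast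
def pvDLN : Nat → List Char → List Char
  | 0, l => l
  | n + 1, l => pvDLN n l.dropLast

-- A's step, with returnString[0:-1] written as dropLast
def pvStepA (st : List Char × Bool) (c : Char) : List Char × Bool :=
  if c = '(' then (st.1.dropLast, true)
  else if c = ')' then (st.1, false)
  else if st.2 = false then (st.1 ++ [c], st.2)
  else st

-- pass 2 of B, as a structural recursion (what the foldl over the reversed tokens computes)
def pvR : List Char → List Char × Int
  | [] => ([], 0)
  | c :: t =>
    if c = '(' then ((pvR t).1, (pvR t).2 + 1)
    else if (pvR t).2 ≠ 0 then ((pvR t).1, (pvR t).2 - 1)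
    else ((pvR t).1 ++ [c], (pvR t).2)

theorem pv_step_eq :
    (fun (st : List Char × Bool) (c : Char) =>
      if c ≠ '(' ∧ c ≠ ')' ∧ st.2 = false then (st.1 ++ [c], st.2)
      else if c = '(' then (PySem.List.slice st.1 (some 0) (some (-1)), true)
      else if c = ')' then (st.1, false)
      else st) = pvStepA := by
  funext st c
  unfold pvStepA
  by_cases h1 : c = '('
  · simp [h1, PySem.List.slice_to_neg_one]
  · by_cases h2 : c = ')'
    · simp [h2]
    · by_cases h3 : st.2 = false <;> simp [h1, h2, h3]

theorem pvDLN_nil (n : Nat) : pvDLN n [] = [] := by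
  induction n with
  | zero => rfl
  | succ n ih => simpa [pvDLN] using ih

theorem pvR_eq_foldr (t : List Char) :
    t.foldr
      (fun ch (st : List Char × Int) =>
        if ch = '(' then (st.1, st.2 + 1)
        else if st.2 ≠ 0 then (st.1, st.2 - 1)
        else (st.1 ++ [ch], st.2))
      (([] : List Char), 0) = pvR t := by
  induction t with
  | nil => rfl
  | cons c t ih => simp only [List.foldr_cons, ih, pvR]

theorem pvR_nonneg (t : List Char) : 0 ≤ (pvR t).2 := by
  induction t with
  | nil => simp [pvR]
  | cons c t ih => unfold pvR; split_ifs <;> simp <;> omega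

-- pass 2 computes exactly the pop-fold of the tokens
theorem pvR_spec (t : List Char) (acc : List Char) :
    t.foldl pvPop acc = pvDLN (pvR t).2.toNat acc ++ (pvR t).1.reverse := by
  induction t generalizing acc with
  | nil => simp [pvR, pvDLN]
  | cons c t ih =>
    have hnn := pvR_nonneg t
    rw [List.foldl_cons, ih]
    by_cases h1 : c = '('
    · have h : ((pvR t).2 + 1).toNat = (pvR t).2.toNat + 1 := by omega
      simp [pvR, h1, h, pvPop, pvDLN]
    · by_cases h2 : (pvR t).2 ≠ 0
      · have h : (pvR t).2.toNat = ((pvR t).2 - 1).toNat + 1 := by omega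
        simp only [pvR, if_neg h1, if_pos h2, pvPop]
        rw [h]
        simp [pvDLN]
      · simp only [pvR, if_neg h1, if_neg h2, pvPop] at *
        have h0 : (pvR t).2 = 0 := by omega
        simp [h0, pvDLN]

-- A's loop computes the pop-fold of the token stream
theorem pvA_run (cs : List Char) (acc : List Char) (b : Bool) :
    (cs.foldl pvStepA (acc, b)).1 = (pvT b cs).foldl pvPop acc := by
  induction cs generalizing acc b with
  | nil => simp [pvT]
  | cons c cs ih =>
    by_cases h1 : c = '('
    · simp [pvT, pvStepA, h1, pvPop, ih]
    · by_cases h2 : c = ')'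
      · simp [pvT, pvStepA, h2, ih]
      · cases b <;> simp [pvT, pvStepA, h1, h2, pvPop, ih]

-- B's first pass builds exactly the token stream
theorem pvB_tokens (cs : List Char) (ts : List Char) (b : Bool) :
    (cs.foldl
      (fun (st : List Char × Bool) ch =>
        if ch = '(' then (st.1 ++ [ch], true)
        else if ch = ')' then (st.1, false)
        else if st.2 = false then (st.1 ++ [ch], st.2)
        else st)
      (ts, b)).1 = ts ++ pvT b cs := by
  induction cs generalizing ts b with
  | nil => simp [pvT]
  | cons c cs ih =>
    by_cases h1 : c = '('
    · simp [pvT, h1, ih]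
    · by_cases h2 : c = ')'
      · simp [pvT, h2, ih]
      · cases b <;> simp [pvT, h1, h2, ih]

-- ===== VERDICT =====
theorem brackets_remove_spec : Claim_equal_brackets_remove := by
  intro s _
  unfold Spec_brackets_remove brackets_remove brackets_remove_alt
  rw [PySem.List.foldl_pyRange_zero_pyGetD' s.toList ' '
    (fun (st : List Char × Bool) (c : Char) =>
      if c ≠ '(' ∧ c ≠ ')' ∧ st.2 = false then (st.1 ++ [c], st.2)
      else if c = '(' then (PySem.List.slice st.1 (some 0) (some (-1)), true)
      else if c = ')' then (st.1, false)
      else st) (([], false)), pv_step_eq, pvA_run, pvB_tokens, List.nil_append,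
    List.foldl_reverse, pvR_eq_foldr, pvR_spec (pvT false s.toList) [], pvDLN_nil]
  simp
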